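-- pv_equiv track=rewrite | github.com/rsandria777/penomoran_surat | app.py | next_suffix
-- ===== SOURCE A (Python) =====
-- def next_suffix(suf):
--     """Increment suffix: None -> 'a', 'a'->'b', ..., 'z'->'aa'."""
--     if not suf:
--         return 'a'
--     s = list(suf)
--     i = len(s)-1
--     while i >= 0:
--         if s[i] != 'z':
--             s[i] = chr(ord(s[i]) + 1)
--             return ''.join(s)
--         s[i] = 'a'
--         i -= 1
--     return 'a' + ''.join(s)
-- ===== SOURCE B (Python) =====
-- def next_suffix(suf):
--     """Increment an alphabetic suffix; None/empty yields the first suffix."""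
--     if not suf:
--         return 'a'
--     if suf[-1] != 'z':
--         return suf[:-1] + chr(ord(suf[-1]) + 1)
--     return next_suffix(suf[:-1]) + 'a'
-- ===== Notes on version B (the rewrite author's own statement) =====
-- stated objective: simpler
-- what changed: Replaces A's in-place index loop over a mutable char list (walk i from len-1 down to 0, overwrite cells, rejoin, with a separate all-'z' fall-through branch) by a three-line structural recursion on immutable string slices that emits the result as it unwinds and needs no index, no mutation and no special all-'z' case.
import Mathlib
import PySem

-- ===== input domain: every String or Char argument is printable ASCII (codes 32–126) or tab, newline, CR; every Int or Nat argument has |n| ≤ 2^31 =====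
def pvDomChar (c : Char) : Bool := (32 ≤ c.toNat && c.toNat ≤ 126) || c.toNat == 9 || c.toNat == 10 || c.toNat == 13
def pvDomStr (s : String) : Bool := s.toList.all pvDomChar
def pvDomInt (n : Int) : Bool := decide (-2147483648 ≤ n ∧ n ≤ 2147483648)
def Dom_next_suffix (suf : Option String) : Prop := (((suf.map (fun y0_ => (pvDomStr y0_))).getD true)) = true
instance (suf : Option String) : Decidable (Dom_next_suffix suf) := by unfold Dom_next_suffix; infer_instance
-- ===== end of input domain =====

-- B replaces A's in-place index loop over a mutable char list by a three-line structural
-- recursion on immutable string slices, with no index, no mutation and no separate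
-- all-'z' branch (objective: simpler).

-- ===== PORT A =====
-- A's while loop walks the char list from index len-1 down to 0; we transcribe it as
-- structural recursion on the REVERSED list: the head of `rev` is s[i], recursing = i -= 1.
-- `some r` = the loop returned ''.join(s) (r is the mutated list, still reversed);
-- `none` = the loop fell through with every cell set to 'a'.
def nextSuffixLoopA : List Char → Option (List Char)
  | [] => none
  | c :: rest =>
    if c ≠ 'z' then some (Char.ofNat (c.toNat + 1) :: rest)   -- s[i] = chr(ord(s[i]) + 1); return
    else
      match nextSuffixLoopA rest with                          -- s[i] = 'a'; i -= 1
      | some r => some ('a' :: r)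
      | none => none

def next_suffix (suf : Option String) : String :=
  match suf with
  | none => "a"                                    -- `if not suf` (None)
  | some s =>
    if s.toList = [] then "a"                      -- `if not suf` (empty string)
    else
      match nextSuffixLoopA s.toList.reverse with
      | some r => String.mk r.reverse              -- ''.join(s)
      | none => String.mk ('a' :: (s.toList.map (fun _ => 'a')))  -- 'a' + ''.join(s), all cells now 'a'

-- ===== PORT B =====
-- Source B's recursion on string slices: suf[-1] = getLast?, suf[:-1] = dropLast,
-- string concatenation = list append; recursion terminates because suf[:-1] is shorter.
def nextSuffixB (s : List Char) : List Char :=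
  match h : s.getLast? with
  | none => ['a']                                                 -- `if not suf` (recursive call hit '')
  | some c =>
    if c ≠ 'z' then s.dropLast ++ [Char.ofNat (c.toNat + 1)]      -- suf[:-1] + chr(ord(suf[-1]) + 1)
    else nextSuffixB s.dropLast ++ ['a']                          -- next_suffix(suf[:-1]) + 'a'
termination_by s.length
decreasing_by
  have hne : s ≠ [] := by intro e; rw [e] at h; simp at h
  have : 0 < s.length := List.length_pos_iff.mpr hne
  simp [List.length_dropLast]
  omega

def next_suffix_alt (suf : Option String) : String :=
  match suf with
  | none => "a"                                    -- `if not suf` (None)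
  | some s =>
    if s.toList = [] then "a"                      -- `if not suf` (empty string)
    else String.mk (nextSuffixB s.toList)

-- ===== PRECONDITION & SPEC =====
-- (no Pre_: A returns normally on every input, and B matches it everywhere)
def Spec_next_suffix (suf : Option String) (out : String) : Prop := out = next_suffix_alt suf
instance (suf : Option String) (out : String) : Decidable (Spec_next_suffix suf out) := by unfold Spec_next_suffix; infer_instance

-- ===== CLAIM (what is proved, stated in full; the proofs are below) =====
def Claim_equal_next_suffix : Prop := ∀ (suf : Option String), Dom_next_suffix suf → Spec_next_suffix suf (next_suffix suf)

-- ===== LEMMAS AND PROOFS =====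

theorem nextSuffixB_nil : nextSuffixB [] = ['a'] := by
  rw [nextSuffixB]
  split
  · rfl
  · next c h => simp at h

theorem nextSuffixB_concat (xs : List Char) (c : Char) :
    nextSuffixB (xs ++ [c])
      = if c ≠ 'z' then xs ++ [Char.ofNat (c.toNat + 1)] else nextSuffixB xs ++ ['a'] := by
  rw [nextSuffixB]
  split
  · next h => rw [List.getLast?_concat] at h; cases h
  · next c' h =>
      rw [List.getLast?_concat] at h
      injection h with h
      subst h
      rw [List.dropLast_concat]

-- A's loop (run on the reversed list, with its fall-through case resolved as A does)
-- computes exactly B's recursion.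
theorem loopA_eq_B (cs : List Char) :
    (match nextSuffixLoopA cs.reverse with
     | some r => r.reverse
     | none => 'a' :: cs.map (fun _ => 'a')) = nextSuffixB cs := by
  induction cs using List.reverseRecOn with
  | nil => simp [nextSuffixLoopA, nextSuffixB_nil]
  | append_singleton xs c ih =>
    rw [nextSuffixB_concat]
    by_cases hc : c = 'z'
    · subst hc
      simp only [ne_eq, not_true_eq_false, if_false, List.reverse_append,
        List.reverse_cons, List.reverse_nil, List.nil_append, List.singleton_append,
        nextSuffixLoopA]
      cases hA : nextSuffixLoopA xs.reverse with
      | some r =>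
        rw [hA] at ih
        simp only [← ih]
        simp
      | none =>
        rw [hA] at ih
        simp only [← ih]
        simp
    · simp [nextSuffixLoopA, hc]

theorem next_suffix_spec : Claim_equal_next_suffix := by
  intro suf _
  unfold Spec_next_suffix next_suffix next_suffix_alt
  cases suf with
  | none => rfl
  | some s =>
    by_cases hnil : s.toList = []
    · simp [hnil]
    · simp only [hnil, ite_false]
      have hb := loopA_eq_B s.toList
      cases hA : nextSuffixLoopA s.toList.reverse with
      | some r =>
        rw [hA] at hb
        simp only at hb
        exact congrArg String.mk hb
      | none =>
        rw [hA] at hb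
        simp only at hb
        exact congrArg String.mk hb
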